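-- pv_equiv track=rewrite | github.com/maxims884/ParserLalafo | getAllCategories.py | filter_leaves
-- ===== SOURCE A (Python) =====
-- def filter_leaves(urls):
--     """
--     Оставляем только листовые ссылки:
--     убираем url, если есть другой url, начинающийся с этого + "/"
--     """
--     leaves = []
--     for u in urls:
--         # считаем, что u — родитель, если есть другой v != u, который начинается с u + '/'
--         is_parent = False
--         prefix = u.rstrip("/") + "/"
--         for v in urls:
--             if v != u and v.startswith(prefix):
--                 is_parent = True
--                 break
--         if not is_parent:
--             leaves.append(u)
--     return leaves
-- ===== SOURCE B (Python) =====
-- def filter_leaves(urls):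
--     # One pass builds a hash index: for every url v, each prefix of v that ends
--     # right before a '/' is recorded as a base with v as its descendant; then
--     # u is a leaf iff the set recorded under u.rstrip('/') is empty or is {u}.
--     children = {}
--     for v in urls:
--         base = ""
--         for ch in v:
--             if ch == "/":
--                 children.setdefault(base, set()).add(v)
--             base += ch
--     leaves = []
--     for u in urls:
--         s = children.get(u.rstrip("/"))
--         if s is None or s == {u}:
--             leaves.append(u)
--     return leaves
-- ===== Notes on version B (the rewrite author's own statement) =====
-- stated objective: faster
-- what changed: Instead of testing every url against every other url with startswith, B makes one pass that builds a dictionary from each base (prefix of a url cut just before a '/') to the set of urls below it, and then decides each url by a single lookup under its rstripped form.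
import Mathlib
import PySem

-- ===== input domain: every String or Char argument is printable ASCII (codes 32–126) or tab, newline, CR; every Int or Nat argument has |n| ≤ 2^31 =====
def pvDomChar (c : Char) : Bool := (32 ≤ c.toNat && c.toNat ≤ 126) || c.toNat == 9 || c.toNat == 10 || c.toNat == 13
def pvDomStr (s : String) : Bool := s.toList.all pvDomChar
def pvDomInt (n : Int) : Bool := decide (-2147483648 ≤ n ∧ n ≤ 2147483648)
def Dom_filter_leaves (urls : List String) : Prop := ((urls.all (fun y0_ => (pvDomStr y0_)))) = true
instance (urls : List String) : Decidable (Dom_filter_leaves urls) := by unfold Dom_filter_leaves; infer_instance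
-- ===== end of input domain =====

-- B replaces A's quadratic all-pairs prefix scan by a hash index built in one pass:
-- each base (prefix of a url cut just before a '/') maps to the set of urls below it.

-- shared primitive: Python's  s.rstrip("/")  on the char list (drop trailing '/' chars)
def pyRstripSlash (cs : List Char) : List Char :=
  ((cs.reverse).dropWhile (fun c => c == '/')).reverse

-- ===== PORT A =====
-- A's inner 'for v in urls: if v != u and v.startswith(prefix): … break' loop
def filterLeavesInner (urls : List String) (u : String) (pre : List Char) : Bool :=
  match urls with
  | [] => false
  | v :: rest =>
      if (v != u) && PySem.Chars.startswith v.toList pre then true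
      else filterLeavesInner rest u pre

def filter_leaves (urls : List String) : List String :=
  urls.foldl (fun leaves u =>
    let pre := pyRstripSlash u.toList ++ ['/']
    if filterLeavesInner urls u pre then leaves else leaves ++ [u]) []

-- ===== PORT B =====
-- B's inner 'for ch in v: if ch == "/": children.setdefault(base, set()).add(v); base += ch'
def addBases (d : PySem.Dict (List Char) (PySem.Set String)) (v : String) :
    PySem.Dict (List Char) (PySem.Set String) :=
  (v.toList.foldl
    (fun (st : PySem.Dict (List Char) (PySem.Set String) × List Char) ch =>
      ((if ch == '/' then st.1.modify st.2 PySem.Set.empty (fun s => s.add v) else st.1),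
       st.2 ++ [ch]))
    (d, [])).1

def filter_leaves_alt (urls : List String) : List String :=
  let children := urls.foldl addBases PySem.Dict.empty
  urls.foldl (fun leaves u =>
    match children.get? (pyRstripSlash u.toList) with
    | none => leaves ++ [u]
    | some s => if PySem.Set.equal s (PySem.Set.ofList [u]) then leaves ++ [u] else leaves) []

-- ===== PRECONDITION & SPEC =====
def Spec_filter_leaves (urls : List String) (out : List String) : Prop := out = filter_leaves_alt urls
instance (urls : List String) (out : List String) : Decidable (Spec_filter_leaves urls out) := by unfold Spec_filter_leaves; infer_instance

-- ===== CLAIM (what is proved, stated in full; the proofs are below) =====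
def Claim_equal_filter_leaves : Prop := ∀ (urls : List String), Dom_filter_leaves urls → Spec_filter_leaves urls (filter_leaves urls)

-- ===== LEMMAS AND PROOFS =====

-- A's inner loop finds a strict descendant of the prefix
theorem inner_iff (u : String) (pre : List Char) (urls : List String) :
    filterLeavesInner urls u pre = true ↔ ∃ v ∈ urls, v ≠ u ∧ pre <+: v.toList := by
  induction urls with
  | nil => simp [filterLeavesInner]
  | cons v rest ih =>
    by_cases h : ((v != u) && PySem.Chars.startswith v.toList pre) = true
    · simp only [filterLeavesInner, h, if_true, true_iff]
      rw [Bool.and_eq_true, bne_iff_ne] at h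
      exact ⟨v, List.mem_cons_self, h.1, (PySem.Chars.startswith_iff _ _).1 h.2⟩
    · have hf : ((v != u) && PySem.Chars.startswith v.toList pre) = false :=
        Bool.eq_false_iff.2 h
      simp only [filterLeavesInner, hf, Bool.false_eq_true, if_false, ih]
      rw [Bool.and_eq_false_iff] at hf
      constructor
      · rintro ⟨w, hw, hne, hp⟩; exact ⟨w, List.mem_cons_of_mem _ hw, hne, hp⟩
      · rintro ⟨w, hw, hne, hp⟩
        rcases List.mem_cons.1 hw with rfl | hw'
        · exfalso
          rcases hf with h1 | h2
          · exact hne (by simpa using h1)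
          · rw [Bool.eq_false_iff] at h2
            exact h2 ((PySem.Chars.startswith_iff _ _).2 hp)
        · exact ⟨w, hw', hne, hp⟩

-- unfolding one character of B's inner loop condition ('key k is a base of the remaining chars')
theorem baseCond_cons (base k : List Char) (c : Char) (cs : List Char) :
    (base <+: k ∧ (k.drop base.length ++ ['/']) <+: (c :: cs)) ↔
      ((base ++ [c]) <+: k ∧ (k.drop (base ++ [c]).length ++ ['/']) <+: cs) ∨ (c = '/' ∧ k = base) := by
  constructor
  · rintro ⟨⟨t, rfl⟩, hsl⟩
    rw [List.drop_left] at hsl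
    cases t with
    | nil =>
      right
      simp only [List.nil_append, List.cons_prefix_cons] at hsl
      exact ⟨hsl.1.symm, by simp⟩
    | cons c' t' =>
      left
      simp only [List.cons_append, List.cons_prefix_cons] at hsl
      obtain ⟨rfl, hsl⟩ := hsl
      refine ⟨⟨t', by simp⟩, ?_⟩
      have hd : (base ++ c' :: t').drop (base ++ [c']).length = t' := by
        have : base ++ c' :: t' = (base ++ [c']) ++ t' := by simp
        rw [this, List.drop_left]
      rw [hd]
      exact hsl
  · rintro (⟨⟨t, hk⟩, hsl⟩ | ⟨rfl, rfl⟩)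
    · subst hk
      have hd : ((base ++ [c]) ++ t).drop (base ++ [c]).length = t := by rw [List.drop_left]
      rw [hd] at hsl
      have hd2 : ((base ++ [c]) ++ t).drop base.length = c :: t := by
        rw [List.append_assoc, List.drop_left]
        simp
      refine ⟨⟨[c] ++ t, by simp⟩, ?_⟩
      rw [hd2]
      exact List.cons_prefix_cons.2 ⟨rfl, hsl⟩
    · refine ⟨List.prefix_refl _, ?_⟩
      simp

-- what B's inner loop does to an arbitrary key, from an arbitrary (dict, base) state
theorem addBases_go_get? (v : String) (cs : List Char) :
    ∀ (base : List Char) (d : PySem.Dict (List Char) (PySem.Set String)) (k : List Char),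
    ((cs.foldl
      (fun (st : PySem.Dict (List Char) (PySem.Set String) × List Char) ch =>
        ((if ch == '/' then st.1.modify st.2 PySem.Set.empty (fun s => s.add v) else st.1),
         st.2 ++ [ch]))
      (d, base)).1).get? k =
      if (base <+: k ∧ (k.drop base.length ++ ['/']) <+: cs)
      then some ((d.getD k PySem.Set.empty).add v) else d.get? k := by
  induction cs with
  | nil =>
    intro base d k
    simp
  | cons c cs' ih =>
    intro base d k
    rw [List.foldl_cons]
    dsimp only
    rw [ih]
    set d' := (if c == '/' then d.modify base PySem.Set.empty (fun s => s.add v) else d) with hd'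
    by_cases h1 : ((base ++ [c]) <+: k ∧ (k.drop (base ++ [c]).length ++ ['/']) <+: cs')
    · have h2 : (base <+: k ∧ (k.drop base.length ++ ['/']) <+: (c :: cs')) :=
        (baseCond_cons _ _ _ _).2 (Or.inl h1)
      have hkne : k ≠ base := by
        rcases h1.1 with ⟨t, ht⟩
        intro hkb
        have := congrArg List.length ht
        simp [hkb] at this
      have hgd : d'.getD k PySem.Set.empty = d.getD k PySem.Set.empty := by
        rw [hd']
        by_cases hc : c == '/'
        · simp only [hc, if_true]
          exact PySem.Dict.getD_modify_of_ne d PySem.Set.empty _ hkne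
        · simp [hc]
      rw [if_pos h1, if_pos h2, hgd]
    · by_cases h2 : c = '/' ∧ k = base
      · obtain ⟨rfl, rfl⟩ := h2
        have h3 : (k <+: k ∧ (k.drop k.length ++ ['/']) <+: ('/' :: cs')) :=
          (baseCond_cons _ _ _ _).2 (Or.inr ⟨rfl, rfl⟩)
        rw [if_neg h1, if_pos h3, hd']
        simp only [beq_self_eq_true, if_true]
        simp [PySem.Dict.modify, PySem.Dict.get?_insert_self, PySem.Dict.getD]
      · have h3 : ¬ (base <+: k ∧ (k.drop base.length ++ ['/']) <+: (c :: cs')) := by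
          rw [baseCond_cons]; tauto
        rw [if_neg h1, if_neg h3, hd']
        by_cases hc : c == '/'
        · have hkb : k ≠ base := fun hkb => h2 ⟨by simpa using hc, hkb⟩
          simp only [hc, if_true, PySem.Dict.modify]
          exact PySem.Dict.get?_insert_of_ne d _ hkb
        · simp [hc]

-- one url v records itself exactly under the keys k with k ++ "/" a prefix of v
theorem addBases_get? (v : String) (d : PySem.Dict (List Char) (PySem.Set String)) (k : List Char) :
    (addBases d v).get? k =
      if (k ++ ['/']) <+: v.toList then some ((d.getD k PySem.Set.empty).add v) else d.get? k := by
  unfold addBases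
  rw [addBases_go_get?]
  have hiff : ([] <+: k ∧ (k.drop ([] : List Char).length ++ ['/']) <+: v.toList) ↔
      (k ++ ['/']) <+: v.toList := by simp
  by_cases h : (k ++ ['/']) <+: v.toList
  · rw [if_pos (hiff.2 h), if_pos h]
  · rw [if_neg (fun hh => h (hiff.1 hh)), if_neg h]

-- B's whole index: under key k sits the set of urls that extend k ++ "/"
theorem build_get? (urls : List String) :
    ∀ (d : PySem.Dict (List Char) (PySem.Set String)) (k : List Char),
    (urls.foldl addBases d).get? k =
      if urls.filter (fun v => decide ((k ++ ['/']) <+: v.toList)) = [] then d.get? k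
      else some ((urls.filter (fun v => decide ((k ++ ['/']) <+: v.toList))).foldl
                   PySem.Set.add (d.getD k PySem.Set.empty)) := by
  induction urls with
  | nil => intro d k; simp
  | cons v rest ih =>
    intro d k
    rw [List.foldl_cons, ih]
    by_cases hp : (k ++ ['/']) <+: v.toList
    · have hf : (v :: rest).filter (fun v => decide ((k ++ ['/']) <+: v.toList)) =
        v :: rest.filter (fun v => decide ((k ++ ['/']) <+: v.toList)) := by
        simp [hp]
      rw [hf]
      have hg : (addBases d v).get? k = some ((d.getD k PySem.Set.empty).add v) := by
        rw [addBases_get?, if_pos hp]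
      have hgd : (addBases d v).getD k PySem.Set.empty = (d.getD k PySem.Set.empty).add v := by
        simp [PySem.Dict.getD, hg]
      by_cases he : rest.filter (fun v => decide ((k ++ ['/']) <+: v.toList)) = []
      · rw [if_pos he, he]
        simp [hg]
      · rw [if_neg he, if_neg (by simp), hgd, List.foldl_cons]
    · have hf : (v :: rest).filter (fun v => decide ((k ++ ['/']) <+: v.toList)) =
        rest.filter (fun v => decide ((k ++ ['/']) <+: v.toList)) := by
        simp [hp]
      rw [hf]
      have hg : (addBases d v).get? k = d.get? k := by
        rw [addBases_get?, if_neg hp]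
      have hgd : (addBases d v).getD k PySem.Set.empty = d.getD k PySem.Set.empty := by
        simp [PySem.Dict.getD, hg]
      rw [hg, hgd]

-- per-url step of the final loops: A's no-descendant test agrees with B's index lookup
theorem step_eq (urls : List String) (u : String) (leaves : List String) :
    (if filterLeavesInner urls u (pyRstripSlash u.toList ++ ['/']) then leaves else leaves ++ [u]) =
    (match (urls.foldl addBases PySem.Dict.empty).get? (pyRstripSlash u.toList) with
     | none => leaves ++ [u]
     | some s => if PySem.Set.equal s (PySem.Set.ofList [u]) then leaves ++ [u] else leaves) := by
  set k := pyRstripSlash u.toList with hk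
  rw [build_get?]
  set S := urls.filter (fun v => decide ((k ++ ['/']) <+: v.toList)) with hS
  have hmem : ∀ v, v ∈ S ↔ v ∈ urls ∧ (k ++ ['/']) <+: v.toList := by
    intro v; rw [hS, List.mem_filter]; simp
  have hinner : filterLeavesInner urls u (k ++ ['/']) = true ↔ ∃ v ∈ S, v ≠ u := by
    rw [inner_iff]
    constructor
    · rintro ⟨v, hv, hne, hp⟩; exact ⟨v, (hmem v).2 ⟨hv, hp⟩, hne⟩
    · rintro ⟨v, hv, hne⟩
      obtain ⟨hv1, hv2⟩ := (hmem v).1 hv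
      exact ⟨v, hv1, hne, hv2⟩
  by_cases hSe : S = []
  · rw [if_pos hSe]
    have : filterLeavesInner urls u (k ++ ['/']) = false := by
      rw [Bool.eq_false_iff]
      intro h
      obtain ⟨v, hv, -⟩ := hinner.1 h
      rw [hSe] at hv
      exact absurd hv (List.not_mem_nil)
    rw [this]
    simp
  · rw [if_neg hSe]
    have hgd : (PySem.Dict.empty : PySem.Dict (List Char) (PySem.Set String)).getD k PySem.Set.empty
        = (PySem.Set.empty : PySem.Set String) := by
      simp [PySem.Dict.getD, PySem.Dict.get?_empty]
    rw [hgd]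
    have hfold : List.foldl PySem.Set.add PySem.Set.empty S = PySem.Set.ofList S := rfl
    rw [hfold]
    show _ = (if PySem.Set.equal (PySem.Set.ofList S) (PySem.Set.ofList [u]) then leaves ++ [u] else leaves)
    by_cases hAll : ∀ v ∈ S, v = u
    · have hEq : PySem.Set.equal (PySem.Set.ofList S) (PySem.Set.ofList [u]) = true := by
        rw [PySem.Set.equal_iff]
        intro x
        rw [PySem.Set.mem_ofList, PySem.Set.mem_ofList, List.mem_singleton]
        constructor
        · exact fun hx => hAll x hx
        · rintro rfl
          obtain ⟨w, hw⟩ := List.exists_mem_of_ne_nil S hSe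
          have := hAll w hw
          rw [← this]; exact hw
      have hIn : filterLeavesInner urls u (k ++ ['/']) = false := by
        rw [Bool.eq_false_iff]
        intro h
        obtain ⟨v, hv, hne⟩ := hinner.1 h
        exact hne (hAll v hv)
      rw [hIn, hEq]
      simp
    · push Not at hAll
      obtain ⟨v, hv, hne⟩ := hAll
      have hEq : PySem.Set.equal (PySem.Set.ofList S) (PySem.Set.ofList [u]) = false := by
        rw [Bool.eq_false_iff]
        intro h
        rw [PySem.Set.equal_iff] at h
        have := (h v).1 (by rw [PySem.Set.mem_ofList]; exact hv)
        rw [PySem.Set.mem_ofList, List.mem_singleton] at this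
        exact hne this
      have hIn : filterLeavesInner urls u (k ++ ['/']) = true := hinner.2 ⟨v, hv, hne⟩
      rw [hIn, hEq]
      simp

-- ===== VERDICT (by name: the statement is the Claim_ definition above) =====
theorem filter_leaves_spec : Claim_equal_filter_leaves := by
  intro urls _
  unfold Spec_filter_leaves filter_leaves filter_leaves_alt
  have hfun : (fun (leaves : List String) (u : String) =>
      if filterLeavesInner urls u (pyRstripSlash u.toList ++ ['/']) then leaves else leaves ++ [u]) =
      (fun (leaves : List String) (u : String) =>
        match (urls.foldl addBases PySem.Dict.empty).get? (pyRstripSlash u.toList) with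
        | none => leaves ++ [u]
        | some s => if PySem.Set.equal s (PySem.Set.ofList [u]) then leaves ++ [u] else leaves) := by
    funext leaves u
    exact step_eq urls u leaves
  show urls.foldl _ [] = urls.foldl _ []
  rw [hfun]
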